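-- pv_equiv track=rewrite | github.com/keyin-sd-12/spr2-g2-robot | robot_group2_ver2.py | split_distance
-- ===== SOURCE A (Python) =====
-- DISTANCE_SPLIT = 490 # (cm) split longer distances into smaller steps of 490 cm
--
-- def split_distance(total_distance, divisor=DISTANCE_SPLIT):
--     result = []
--     while total_distance >= divisor:
--         result.append(divisor)
--         total_distance = total_distance - divisor
--     if total_distance >= 0:
--         result.append(total_distance)
--     return result
-- ===== SOURCE B (Python) =====
-- DISTANCE_SPLIT = 490
--
-- def split_distance(total_distance, divisor=DISTANCE_SPLIT):
--     # closed form: count full steps by integer division, then the remainder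
--     if total_distance < 0:
--         return []
--     count = total_distance // divisor
--     return [divisor] * count + [total_distance - divisor * count]
-- ===== Notes on version B (the rewrite author's own statement) =====
-- stated objective: simpler
-- what changed: Replaces the repeated-subtraction loop by a closed form: count = total_distance // divisor, returning [divisor]*count + [remainder].
import Mathlib
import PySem

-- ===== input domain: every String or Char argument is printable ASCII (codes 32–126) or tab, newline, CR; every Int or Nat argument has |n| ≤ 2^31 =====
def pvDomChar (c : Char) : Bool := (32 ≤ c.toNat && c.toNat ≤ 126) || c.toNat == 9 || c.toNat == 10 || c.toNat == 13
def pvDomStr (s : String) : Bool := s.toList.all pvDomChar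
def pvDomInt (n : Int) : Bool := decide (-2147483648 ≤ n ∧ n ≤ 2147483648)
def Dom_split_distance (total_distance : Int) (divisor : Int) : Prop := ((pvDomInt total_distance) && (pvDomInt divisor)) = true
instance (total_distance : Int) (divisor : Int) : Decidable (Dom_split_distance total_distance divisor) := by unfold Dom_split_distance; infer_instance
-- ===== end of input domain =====

-- B replaces A's repeated-subtraction loop by a closed form using integer floor division (simpler).

-- ===== PORT A =====
-- A's while loop; the '0 < divisor' conjunct only makes the recursion total
-- (for divisor ≤ 0 with total_distance ≥ divisor the Python loop diverges; Pre_ excludes that).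
def splitLoopA (total_distance : Int) (divisor : Int) (result : List Int) : List Int :=
  if divisor ≤ total_distance ∧ 0 < divisor then
    splitLoopA (total_distance - divisor) divisor (result ++ [divisor])
  else if 0 ≤ total_distance then result ++ [total_distance] else result
termination_by total_distance.toNat
decreasing_by omega

def split_distance (total_distance : Int) (divisor : Int) : List Int :=
  splitLoopA total_distance divisor []

-- ===== PORT B =====
def split_distance_alt (total_distance : Int) (divisor : Int) : List Int :=
  if total_distance < 0 then []
  else
    let count := PySem.Int.floordiv total_distance divisor
    List.replicate count.toNat divisor ++ [total_distance - divisor * count]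

-- ===== PRECONDITION & SPEC =====
-- Pre_ excludes exactly the inputs where A's while loop never terminates (divisor ≤ 0 with total_distance ≥ divisor).
def Pre_split_distance (total_distance : Int) (divisor : Int) : Prop :=
  0 < divisor ∨ total_distance < divisor
instance (total_distance : Int) (divisor : Int) : Decidable (Pre_split_distance total_distance divisor) := by unfold Pre_split_distance; infer_instance
def pvWitness_split_distance : Int × Int := (1234, 490)

def Spec_split_distance (total_distance : Int) (divisor : Int) (out : List Int) : Prop := out = split_distance_alt total_distance divisor
instance (total_distance : Int) (divisor : Int) (out : List Int) : Decidable (Spec_split_distance total_distance divisor out) := by unfold Spec_split_distance; infer_instance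

-- ===== CLAIM (what is proved, stated in full; the proofs are below) =====
def Claim_equal_split_distance : Prop := ∀ (total_distance : Int) (divisor : Int), Dom_split_distance total_distance divisor → Pre_split_distance total_distance divisor → Spec_split_distance total_distance divisor (split_distance total_distance divisor)

-- ===== LEMMAS AND PROOFS =====

lemma alt_neg (t d : Int) (h : t < 0) : split_distance_alt t d = [] := by
  simp [split_distance_alt, h]

lemma alt_step (t d : Int) (hd : 0 < d) (h : d ≤ t) :
    split_distance_alt t d = d :: split_distance_alt (t - d) d := by
  have ht : ¬ t < 0 := by omega
  have ht' : ¬ t - d < 0 := by omega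
  have hfd : PySem.Int.floordiv t d = PySem.Int.floordiv (t - d) d + 1 := by
    rw [PySem.Int.floordiv_eq_iff_of_pos hd]
    have h2 := (PySem.Int.floordiv_eq_iff_of_pos hd (a := t - d)
      (q := PySem.Int.floordiv (t - d) d)).mp rfl
    constructor <;> nlinarith [h2.1, h2.2]
  have hnn : 0 ≤ PySem.Int.floordiv (t - d) d := by
    have h2 := (PySem.Int.floordiv_eq_iff_of_pos hd (a := t - d)
      (q := PySem.Int.floordiv (t - d) d)).mp rfl
    nlinarith [h2.1, h2.2]
  simp only [split_distance_alt, ht, ht', if_false, hfd]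
  have : (PySem.Int.floordiv (t - d) d + 1).toNat = (PySem.Int.floordiv (t - d) d).toNat + 1 := by
    omega
  rw [this, List.replicate_succ]
  simp only [List.cons_append, List.cons_inj_right]
  congr 1
  ring_nf

lemma alt_base (t d : Int) (h0 : 0 ≤ t) (h : t < d) :
    split_distance_alt t d = [t] := by
  have hd : 0 < d := by omega
  have hfd : PySem.Int.floordiv t d = 0 := by
    rw [PySem.Int.floordiv_eq_iff_of_pos hd]; constructor <;> nlinarith
  simp [split_distance_alt, hfd, show ¬ t < 0 by omega]

lemma loopA_eq (t d : Int) (acc : List Int) (hpre : 0 < d ∨ t < d) :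
    splitLoopA t d acc = acc ++ split_distance_alt t d := by
  by_cases hd : 0 < d
  · induction ht : t.toNat using Nat.strong_induction_on generalizing t acc with
    | _ n ih =>
      rw [splitLoopA]
      by_cases hc : d ≤ t
      · simp only [hc, hd, and_self, if_true]
        rw [ih ((t - d).toNat) (by omega) _ _ (Or.inl hd) rfl,
            alt_step t d hd hc]
        simp
      · simp only [hc, false_and, if_false]
        by_cases h0 : 0 ≤ t
        · rw [alt_base t d h0 (by omega)]; simp [h0]
        · rw [alt_neg t d (by omega)]; simp [h0]
  · have ht : t < d := by tauto
    rw [splitLoopA]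
    have : t < 0 := by omega
    simp [show ¬ (d ≤ t ∧ 0 < d) by omega, show ¬ 0 ≤ t by omega, alt_neg t d this]

-- ===== VERDICT (by name: the statement is the Claim_ definition above) =====
theorem split_distance_spec : Claim_equal_split_distance := by
  intro t d _ hpre
  show split_distance t d = split_distance_alt t d
  rw [split_distance, loopA_eq t d [] hpre, List.nil_append]
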